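-- pv_equiv track=rewrite | github.com/RedbeanGit/polyalliances | release/polyalliance.py | chaine_est_pioche
-- ===== SOURCE A (Python) =====
-- VALEURS=("A", "R", "D", "V", "10", "9", "8", "7", "6", "5", "4", "3", "2")
--
-- COULEURS={"P": "♠", "K": "♦", "C": "♥", "T": "♣"}
--
-- def chaine_est_pioche(chaine):
-- 	""" Renvoie True si chaine représente une pioche sinon False.
-- 		(fonction auxilière)
--
-- 		chaine (str): La chaine à tester """
--
-- 	for carte in chaine.split():
-- 		# les chaines vides sont acceptées (exemple à la fin du fichier)
-- 		if carte:
-- 			attr = carte.split("-")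
--
-- 			# carte ne représente pas une carte...
-- 			# s'il n'y a pas 2 attributs
-- 			if len(attr) != 2:
-- 				return False
-- 			# ou si le premier attribut n'est pas une valeur valide
-- 			elif attr[0] not in VALEURS:
-- 				return False
-- 			# ou si le deuxième n'est pas une couleur valide
-- 			elif attr[1] not in COULEURS:
-- 				return False
-- 	return True
-- ===== SOURCE B (Python) =====
-- VALEURS=("A", "R", "D", "V", "10", "9", "8", "7", "6", "5", "4", "3", "2")
--
-- COULEURS={"P": "\u2660", "K": "\u2666", "C": "\u2665", "T": "\u2663"}
--
-- VALID_CARDS = {"-".join((v, c)) for v in VALEURS for c in COULEURS}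
--
-- def chaine_est_pioche(chaine):
-- 	""" Renvoie True si chaine représente une pioche sinon False. """
-- 	return all(carte in VALID_CARDS for carte in chaine.split())
-- ===== Notes on version B (the rewrite author's own statement) =====
-- stated objective: simpler
-- what changed: Instead of splitting each token on the hyphen, checking the piece count and testing the two pieces against VALEURS and COULEURS with early returns, B precomputes once the set of all 52 valid card strings (Cartesian product of VALEURS and COULEURS keys) and just checks every whitespace token is in that set.
import Mathlib
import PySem

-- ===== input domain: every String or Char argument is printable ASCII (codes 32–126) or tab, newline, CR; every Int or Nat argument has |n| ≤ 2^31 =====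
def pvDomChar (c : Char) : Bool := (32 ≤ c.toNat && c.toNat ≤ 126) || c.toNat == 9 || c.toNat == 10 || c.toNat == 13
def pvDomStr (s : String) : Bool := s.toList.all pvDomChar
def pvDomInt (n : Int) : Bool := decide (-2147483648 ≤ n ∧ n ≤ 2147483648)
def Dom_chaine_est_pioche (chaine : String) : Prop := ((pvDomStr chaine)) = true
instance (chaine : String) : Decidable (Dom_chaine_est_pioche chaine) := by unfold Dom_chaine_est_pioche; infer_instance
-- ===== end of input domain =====

-- B replaces A's per-token hyphen split / length check / two membership branches by one lookup
-- in a precomputed set of all valid card strings (objective: simpler).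

-- ===== PORT A =====
def pvVALEURS : List String := ["A", "R", "D", "V", "10", "9", "8", "7", "6", "5", "4", "3", "2"]

def pvCOULEURS : PySem.Dict String String :=
  PySem.Dict.ofList [("P", "♠"), ("K", "♦"), ("C", "♥"), ("T", "♣")]

-- the `for carte in chaine.split(): … return False / fall through` loop, with early returns
def pvAloop : List String → Bool
  | [] => true
  | carte :: rest =>
    if carte ≠ "" then
      let attr := (PySem.Str.split? carte "-").getD []
      if attr.length ≠ 2 then false
      else if !(pvVALEURS.contains (attr.getD 0 "")) then false
      else if !(pvCOULEURS.contains (attr.getD 1 "")) then false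
      else pvAloop rest
    else pvAloop rest

def chaine_est_pioche (chaine : String) : Bool :=
  pvAloop (PySem.Str.split₀ chaine)

-- ===== PORT B =====
-- VALID_CARDS = {"-".join((v, c)) for v in VALEURS for c in COULEURS}
def pvVALID_CARDS : PySem.Set String :=
  PySem.Set.ofList (pvVALEURS.flatMap (fun v => pvCOULEURS.keys.map (fun c => PySem.Str.join "-" [v, c])))

def chaine_est_pioche_alt (chaine : String) : Bool :=
  (PySem.Str.split₀ chaine).all (fun carte => pvVALID_CARDS.contains carte)

-- ===== PRECONDITION & SPEC =====
def Spec_chaine_est_pioche (chaine : String) (out : Bool) : Prop := out = chaine_est_pioche_alt chaine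
instance (chaine : String) (out : Bool) : Decidable (Spec_chaine_est_pioche chaine out) := by unfold Spec_chaine_est_pioche; infer_instance

-- ===== CLAIM (what is proved, stated in full; the proofs are below) =====
def Claim_equal_chaine_est_pioche : Prop := ∀ (chaine : String), Dom_chaine_est_pioche chaine → Spec_chaine_est_pioche chaine (chaine_est_pioche chaine)

-- ===== LEMMAS AND PROOFS =====

-- every token produced by str.split() is nonempty
lemma pv_split₀_go_ne_nil : ∀ (l cur : List Char) (acc : List (List Char)), (∀ u ∈ acc, u ≠ []) →
    ∀ t ∈ PySem.Chars.split₀.go l cur acc, t ≠ [] := by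
  intro l
  induction l with
  | nil =>
    intro cur acc hacc t ht
    simp only [PySem.Chars.split₀.go] at ht
    split_ifs at ht with h
    · exact hacc t (List.mem_reverse.mp ht)
    · rcases List.mem_cons.mp (List.mem_reverse.mp ht) with hm | hm
      · subst hm; simpa using h
      · exact hacc t hm
  | cons c rest ih =>
    intro cur acc hacc t ht
    simp only [PySem.Chars.split₀.go] at ht
    split_ifs at ht with h1 h2
    · exact ih [] acc hacc t ht
    · refine ih [] (cur.reverse :: acc) ?_ t ht
      intro u hu
      rcases List.mem_cons.mp hu with hm | hm
      · subst hm; simpa using h2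
      · exact hacc u hm
    · exact ih (c :: cur) acc hacc t ht

lemma pv_split₀_tokens_ne (s : String) : ∀ t ∈ PySem.Str.split₀ s, t ≠ "" := by
  intro t ht hcon
  have h : t.toList ∈ PySem.Chars.split₀ s.toList := by
    rw [← PySem.Str.split₀_map_toList]
    exact List.mem_map_of_mem ht
  have := pv_split₀_go_ne_nil s.toList [] [] (by simp) t.toList h
  apply this
  rw [hcon]; rfl

-- the splitOn accumulator rebuilds the input
lemma pv_splitOn_go_join (sep : List Char) (hsep : sep ≠ []) :
    ∀ (fuel : Nat) (l cur : List Char) (acc : List (List Char)), l.length < fuel →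
    ∃ parts, PySem.Chars.splitOn.go sep fuel l cur acc = acc.reverse ++ parts ∧ parts ≠ [] ∧
      PySem.Chars.join sep parts = cur.reverse ++ l := by
  intro fuel
  induction fuel with
  | zero => intro l cur acc h; omega
  | succ fuel ih =>
    intro l cur acc h
    cases l with
    | nil =>
      refine ⟨[cur.reverse], ?_, by simp, by simp [PySem.Chars.join_singleton]⟩
      simp [PySem.Chars.splitOn.go]
    | cons c rest =>
      simp only [PySem.Chars.splitOn.go]
      split_ifs with hp
      · -- sep is a prefix of l
        obtain ⟨l2, hl2⟩ := List.isPrefixOf_iff_prefix.mp hp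
        have hdrop : List.drop sep.length (c :: rest) = l2 := by
          rw [← hl2]; simp
        have hlenE : sep.length + l2.length = rest.length + 1 := by
          have := congrArg List.length hl2; simpa using this
        have hs1 : 1 ≤ sep.length := by
          cases sep with | nil => exact absurd rfl hsep | cons a b => simp
        have hlen : l2.length < fuel := by
          have hl : rest.length + 1 < fuel + 1 := by simpa using h
          omega
        obtain ⟨parts, hgo, hne, hj⟩ := ih l2 [] (cur.reverse :: acc) hlen
        refine ⟨cur.reverse :: parts, ?_, by simp, ?_⟩
        · rw [hdrop, hgo]; simp
        · cases parts with
          | nil => exact absurd rfl hne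
          | cons p ps =>
            rw [PySem.Chars.join_cons_cons, hj]
            simp [← hl2, List.append_assoc]
      · obtain ⟨parts, hgo, hne, hj⟩ := ih rest (c :: cur) acc (by simpa using Nat.lt_of_succ_lt_succ h)
        exact ⟨parts, hgo, hne, by rw [hj]; simp⟩

lemma pv_splitOn_pair {s a b : List Char} (h : PySem.Chars.splitOn s ['-'] = [a, b]) :
    s = a ++ '-' :: b := by
  obtain ⟨parts, hgo, hne, hj⟩ := pv_splitOn_go_join ['-'] (by simp) (s.length + 1) s [] [] (by omega)
  rw [PySem.Chars.splitOn] at h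
  rw [h] at hgo
  simp at hgo
  rw [← hgo] at hj
  rw [PySem.Chars.join_cons_cons, PySem.Chars.join_singleton] at hj
  simpa using hj.symm

-- token-level, hard direction: A's three guards all pass → the token is in the precomputed set
lemma pv_token_pass (t : String)
    (h1 : ¬ ((PySem.Str.split? t "-").getD []).length ≠ 2)
    (h2 : ¬ (!(pvVALEURS.contains (((PySem.Str.split? t "-").getD []).getD 0 ""))) = true)
    (h3 : ¬ (!(pvCOULEURS.contains (((PySem.Str.split? t "-").getD []).getD 1 ""))) = true) :
    pvVALID_CARDS.contains t = true := by
  have hsp : PySem.Str.split? t "-" = some (List.map String.ofList (PySem.Chars.splitOn t.toList ['-'])) := rfl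
  rw [hsp] at h1 h2 h3
  simp only [Option.getD_some] at h1 h2 h3
  have hlen : (PySem.Chars.splitOn t.toList ['-']).length = 2 := by
    have := not_ne_iff.mp h1; simpa using this
  rcases hxy : PySem.Chars.splitOn t.toList ['-'] with _ | ⟨x, _ | ⟨y, _ | ⟨z, zs⟩⟩⟩ <;>
    rw [hxy] at hlen <;> simp at hlen
  rw [hxy] at h2 h3
  simp only [List.map_cons, List.map_nil, List.getD_cons_zero, List.getD_cons_succ] at h2 h3
  have hx : String.ofList x ∈ pvVALEURS := by
    have : pvVALEURS.contains (String.ofList x) = true := by simpa using h2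
    exact List.contains_iff_mem.mp this
  have hy : String.ofList y ∈ pvCOULEURS.keys := by
    have : pvCOULEURS.contains (String.ofList y) = true := by simpa using h3
    rw [PySem.Dict.contains_eq_decide_mem_keys] at this
    exact of_decide_eq_true this
  have ht : t.toList = x ++ '-' :: y := pv_splitOn_pair hxy
  have hjoin : PySem.Str.join "-" [String.ofList x, String.ofList y] = t := by
    have : PySem.Chars.join ['-'] [x, y] = x ++ '-' :: y := by
      rw [PySem.Chars.join_cons_cons, PySem.Chars.join_singleton]; simp
    calc PySem.Str.join "-" [String.ofList x, String.ofList y]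
        = String.ofList (PySem.Chars.join ['-'] [x, y]) := by
          simp [PySem.Str.join, String.toList_ofList]
      _ = t := by rw [this, ← ht, String.ofList_toList]
  apply List.contains_iff_mem.mpr
  apply (PySem.Set.mem_ofList _ _).mpr
  apply List.mem_flatMap.mpr
  exact ⟨String.ofList x, hx, List.mem_map.mpr ⟨String.ofList y, hy, hjoin⟩⟩

-- token-level, easy direction: a token of the set passes A's three guards
set_option maxRecDepth 8000 in
lemma pv_token_mem (t : String) (h : pvVALID_CARDS.contains t = true) :
    ((PySem.Str.split? t "-").getD []).length = 2 ∧
    pvVALEURS.contains (((PySem.Str.split? t "-").getD []).getD 0 "") = true ∧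
    pvCOULEURS.contains (((PySem.Str.split? t "-").getD []).getD 1 "") = true := by
  have hm : t ∈ (["A-P", "A-K", "A-C", "A-T", "R-P", "R-K", "R-C", "R-T", "D-P", "D-K", "D-C", "D-T", "V-P", "V-K", "V-C", "V-T", "10-P", "10-K", "10-C", "10-T", "9-P", "9-K", "9-C", "9-T", "8-P", "8-K", "8-C", "8-T", "7-P", "7-K", "7-C", "7-T", "6-P", "6-K", "6-C", "6-T", "5-P", "5-K", "5-C", "5-T", "4-P", "4-K", "4-C", "4-T", "3-P", "3-K", "3-C", "3-T", "2-P", "2-K", "2-C", "2-T"] : List String) := by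
    have : pvVALID_CARDS = ["A-P", "A-K", "A-C", "A-T", "R-P", "R-K", "R-C", "R-T", "D-P", "D-K", "D-C", "D-T", "V-P", "V-K", "V-C", "V-T", "10-P", "10-K", "10-C", "10-T", "9-P", "9-K", "9-C", "9-T", "8-P", "8-K", "8-C", "8-T", "7-P", "7-K", "7-C", "7-T", "6-P", "6-K", "6-C", "6-T", "5-P", "5-K", "5-C", "5-T", "4-P", "4-K", "4-C", "4-T", "3-P", "3-K", "3-C", "3-T", "2-P", "2-K", "2-C", "2-T"] := by decide
    rw [← this]
    exact List.contains_iff_mem.mp h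
  fin_cases hm <;> refine ⟨by decide, by decide, by decide⟩

-- loop-level equivalence over nonempty tokens
lemma pv_loop_eq : ∀ ts : List String, (∀ t ∈ ts, t ≠ "") →
    pvAloop ts = ts.all (fun carte => pvVALID_CARDS.contains carte) := by
  intro ts
  induction ts with
  | nil => intro _; rfl
  | cons carte rest ih =>
    intro hne
    have hc : carte ≠ "" := hne carte (by simp)
    have hrest : ∀ t ∈ rest, t ≠ "" := fun t ht => hne t (by simp [ht])
    simp only [pvAloop, if_pos hc, List.all_cons]
    split_ifs with h1 h2 h3
    · have hcc : pvVALID_CARDS.contains carte = false := by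
        by_contra hcon
        exact h1 (pv_token_mem carte (by simpa using hcon)).1
      rw [hcc, Bool.false_and]
    · have hcc : pvVALID_CARDS.contains carte = false := by
        by_contra hcon
        have hm := (pv_token_mem carte (by simpa using hcon)).2.1
        rw [hm] at h2; simp at h2
      rw [hcc, Bool.false_and]
    · have hcc : pvVALID_CARDS.contains carte = false := by
        by_contra hcon
        have hm := (pv_token_mem carte (by simpa using hcon)).2.2
        rw [hm] at h3; simp at h3
      rw [hcc, Bool.false_and]
    · rw [pv_token_pass carte h1 h2 h3, Bool.true_and]
      exact ih hrest

-- ===== VERDICT (by name: the statement is the Claim_ definition above) =====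
theorem chaine_est_pioche_spec : Claim_equal_chaine_est_pioche := by
  intro chaine _
  unfold Spec_chaine_est_pioche chaine_est_pioche chaine_est_pioche_alt
  exact pv_loop_eq (PySem.Str.split₀ chaine) (pv_split₀_tokens_ne chaine)
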